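-- pv_equiv track=rewrite | github.com/Abigiris/TypeAnnotationGeneration | Evaluation/evaluate_annotations.py | is_parametric
-- ===== SOURCE A (Python) =====
-- ParametricType = ('list', 'tuple', 'dict', 'set', 'callable', 'generator', 'sequence', 'iterable', 'iterator',
--                   'collection', 'mapping', 'type')
--
-- def is_parametric(type_str):
--     type_str = type_str.lower()
--     for generic in ParametricType:
--         if type_str == generic or type_str.startswith(generic + '['):
--             return True
--     if '[' in type_str:
--         may_other_type = type_str.split('[', maxsplit=1)[0]
--         if may_other_type.isalpha() and not may_other_type.startswith('union') and not may_other_type.startswith('optional'):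
--             return True
--     return False
-- ===== SOURCE B (Python) =====
-- _PARAMETRIC = {'list', 'tuple', 'dict', 'set', 'callable', 'generator', 'sequence', 'iterable',
--                'iterator', 'collection', 'mapping', 'type'}
--
-- def is_parametric(type_str):
--     head, sep, _ = type_str.lower().partition('[')
--     if sep:
--         return head.isalpha() and not head.startswith('union') and not head.startswith('optional')
--     return head in _PARAMETRIC
-- ===== Notes on version B (the rewrite author's own statement) =====
-- stated objective: simpler
-- what changed: Replaces the 12-way loop of equality/startswith tests plus a separate '[' branch by a single partition on the first '[': with a bracket the head just needs to be alphabetic and not union/optional (which subsumes every generic name), without one it is a set membership.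
import Mathlib
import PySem

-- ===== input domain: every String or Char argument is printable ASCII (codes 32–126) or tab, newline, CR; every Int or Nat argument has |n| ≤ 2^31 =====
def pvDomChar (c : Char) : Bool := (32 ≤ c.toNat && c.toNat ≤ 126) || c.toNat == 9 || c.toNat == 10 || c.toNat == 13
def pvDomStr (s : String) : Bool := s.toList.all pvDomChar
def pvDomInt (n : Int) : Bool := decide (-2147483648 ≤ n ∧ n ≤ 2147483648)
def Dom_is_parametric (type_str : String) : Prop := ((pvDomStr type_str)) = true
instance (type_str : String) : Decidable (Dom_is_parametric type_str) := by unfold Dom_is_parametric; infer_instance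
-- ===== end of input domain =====

-- B replaces A's 12-way equality/startswith loop plus separate '[' branch by one partition on
-- the first '[': bracket present → head alphabetic and not union/optional; else set membership.

-- ===== PORT A =====
def ParametricType : List String :=
  ["list", "tuple", "dict", "set", "callable", "generator", "sequence", "iterable", "iterator",
   "collection", "mapping", "type"]

def is_parametric (type_str : String) : Bool :=
  let t := PySem.Str.lower type_str
  if ParametricType.any (fun generic => t == generic || PySem.Str.startswith t (generic ++ "[")) then
    true
  else if PySem.Str.isIn "[" t then
    let may_other_type := ((PySem.Str.splitMax? t "[" 1).getD []).headD ""
    PySem.Str.strIsalpha may_other_type &&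
      !(PySem.Str.startswith may_other_type "union") &&
      !(PySem.Str.startswith may_other_type "optional")
  else false

-- ===== PORT B =====
def pvParamNames : List (List Char) :=
  ["list".toList, "tuple".toList, "dict".toList, "set".toList, "callable".toList,
   "generator".toList, "sequence".toList, "iterable".toList, "iterator".toList,
   "collection".toList, "mapping".toList, "type".toList]

def is_parametric_alt (type_str : String) : Bool :=
  -- str.partition('[') ported by hand (exact): head = chars before the first '[',
  -- a separator was found iff head is shorter than the string.
  let l := PySem.Chars.lower type_str.toList
  let head := l.takeWhile (fun c => c != '[')
  if head.length < l.length then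
    PySem.Chars.strIsalpha head &&
      !(PySem.Chars.startswith head "union".toList) &&
      !(PySem.Chars.startswith head "optional".toList)
  else
    pvParamNames.contains head

-- ===== PRECONDITION & SPEC =====
def Spec_is_parametric (type_str : String) (out : Bool) : Prop := out = is_parametric_alt type_str
instance (type_str : String) (out : Bool) : Decidable (Spec_is_parametric type_str out) := by unfold Spec_is_parametric; infer_instance

-- ===== CLAIM (what is proved, stated in full; the proofs are below) =====
def Claim_equal_is_parametric : Prop := ∀ (type_str : String), Dom_is_parametric type_str → Spec_is_parametric type_str (is_parametric type_str)

-- ===== LEMMAS AND PROOFS =====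

theorem str_beq_toList (a b : String) : (a == b) = (a.toList == b.toList) := by
  rcases a with ⟨la⟩; rcases b with ⟨lb⟩
  simp [String.ext_iff]

-- chars before the first '[' of x ++ '[' :: y are exactly x
theorem takeWhile_bracket (x y : List Char) (hx : '[' ∉ x) :
    (x ++ '[' :: y).takeWhile (fun c => c != '[') = x := by
  induction x with
  | nil => simp
  | cons a x ih =>
    simp only [List.mem_cons, not_or] at hx
    simp [ih hx.2, Ne.symm hx.1]

theorem startswith_bracket_iff (g h r : List Char) (hg : '[' ∉ g) (hh : '[' ∉ h) :
    PySem.Chars.startswith (h ++ '[' :: r) (g ++ ['[']) = true ↔ h = g := by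
  rw [PySem.Chars.startswith_iff]
  constructor
  · rintro ⟨t, ht⟩
    have := congrArg (List.takeWhile (fun c => c != '[')) ht
    rwa [List.append_assoc, List.singleton_append, takeWhile_bracket g (t) hg,
      takeWhile_bracket h r hh, eq_comm] at this
  · rintro rfl
    exact ⟨r, by simp⟩

theorem startswith_no_bracket (l g : List Char) (hl : '[' ∉ l) (hg : '[' ∈ g) :
    PySem.Chars.startswith l g = false := by
  rw [Bool.eq_false_iff]
  intro hsw
  rw [PySem.Chars.startswith_iff] at hsw
  exact hl (hsw.subset hg)

theorem go_zero (f : Nat) (r : List Char) (acc : List (List Char)) :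
    PySem.Chars.splitOnMax.go ['['] f 0 r [] acc = (r :: acc).reverse := by
  cases f with
  | zero => simp [PySem.Chars.splitOnMax.go]
  | succ f => cases r <;> simp [PySem.Chars.splitOnMax.go]

theorem go_bracket (h : List Char) (f : Nat) (r cur : List Char) (acc : List (List Char))
    (hh : '[' ∉ h) (hf : h.length < f) :
    PySem.Chars.splitOnMax.go ['['] f 1 (h ++ '[' :: r) cur acc
      = acc.reverse ++ [cur.reverse ++ h, r] := by
  induction h generalizing f cur acc with
  | nil =>
    cases f with
    | zero => omega
    | succ f =>
      simp only [List.nil_append]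
      rw [show PySem.Chars.splitOnMax.go ['['] (f + 1) 1 ('[' :: r) cur acc
            = PySem.Chars.splitOnMax.go ['['] f 0 r [] (cur.reverse :: acc) from by
          simp [PySem.Chars.splitOnMax.go, List.isPrefixOf]]
      simp [go_zero]
  | cons a h ih =>
    cases f with
    | zero => omega
    | succ f =>
      simp only [List.mem_cons, not_or] at hh
      simp only [List.length_cons] at hf
      rw [show ((a :: h) ++ '[' :: r) = a :: (h ++ '[' :: r) from rfl]
      rw [show PySem.Chars.splitOnMax.go ['['] (f + 1) 1 (a :: (h ++ '[' :: r)) cur acc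
            = PySem.Chars.splitOnMax.go ['['] f 1 (h ++ '[' :: r) (a :: cur) acc from by
          simp [PySem.Chars.splitOnMax.go, List.isPrefixOf, hh.1]]
      rw [ih f (a :: cur) acc hh.2 (by omega)]
      simp

theorem splitOnMax_bracket (h r : List Char) (hh : '[' ∉ h) :
    PySem.Chars.splitOnMax (h ++ '[' :: r) ['['] 1 = [h, r] := by
  rw [PySem.Chars.splitOnMax]
  rw [if_neg (by norm_num)]
  rw [show (1 : Int).toNat = 1 from rfl, go_bracket h _ r [] [] hh (by simp)]
  simp

-- the 12 generic names: each is alphabetic and starts with neither 'union' nor 'optional'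
theorem names_cond (h : List Char) (hm : h ∈ pvParamNames) :
    (PySem.Chars.strIsalpha h &&
      !(PySem.Chars.startswith h "union".toList) &&
      !(PySem.Chars.startswith h "optional".toList)) = true := by
  fin_cases hm <;> decide

theorem exists_bracket_split (l : List Char) (h : '[' ∈ l) :
    ∃ a r, l = a ++ '[' :: r ∧ '[' ∉ a := by
  induction l with
  | nil => cases h
  | cons c l ih =>
    by_cases hc : c = '['
    · exact ⟨[], l, by simp [hc], by simp⟩
    · rcases List.mem_cons.mp h with h1 | h2
      · exact absurd h1.symm hc
      · rcases ih h2 with ⟨a, r, rfl, ha⟩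
        exact ⟨c :: a, r, rfl, by simp [ha]; exact fun e => hc e.symm⟩

theorem mem_names (g : String) (hg : g ∈ ParametricType) : g.toList ∈ pvParamNames := by
  fin_cases hg <;> decide

theorem loop_hit (t : String) (h r : List Char) (hl : t.toList = h ++ '[' :: r)
    (hh : '[' ∉ h) (g : String) (hg : g ∈ ParametricType)
    (hit : (t == g || PySem.Str.startswith t (g ++ "[")) = true) :
    h = g.toList := by
  have hgb : '[' ∉ g.toList := by fin_cases hg <;> decide
  rw [Bool.or_eq_true, str_beq_toList, PySem.Str.startswith_eq, String.toList_append, hl] at hit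
  rcases hit with hit | hit
  · exfalso
    have he : h ++ '[' :: r = g.toList := beq_iff_eq.mp hit
    exact hgb (he ▸ (by simp : '[' ∈ h ++ '[' :: r))
  · have hit' : PySem.Chars.startswith (h ++ '[' :: r) (g.toList ++ ['[']) = true := by
      simpa using hit
    exact (startswith_bracket_iff g.toList h r hgb hh).mp hit'

-- ===== VERDICT (by name: the statement is the Claim_ definition above) =====
theorem is_parametric_spec : Claim_equal_is_parametric := by
  intro s _
  unfold Spec_is_parametric
  simp only [is_parametric, is_parametric_alt]
  rw [← PySem.Str.toList_lower]
  generalize PySem.Str.lower s = t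
  by_cases hbr : '[' ∈ t.toList
  · -- a '[' is present: both sides reduce to the head condition
    rcases exists_bracket_split t.toList hbr with ⟨h, r, hl, hh⟩
    rw [hl, takeWhile_bracket h r hh]
    have hblen : h.length < (h ++ '[' :: r).length := by simp
    rw [if_pos hblen]
    by_cases hany : (ParametricType.any
        fun generic => t == generic || PySem.Str.startswith t (generic ++ "[")) = true
    · rw [if_pos hany]
      rcases List.any_eq_true.mp hany with ⟨g, hg, hit⟩
      exact (names_cond h (loop_hit t h r hl hh g hg hit ▸ mem_names g hg)).symm
    · rw [if_neg hany]
      have hisin : PySem.Str.isIn "[" t = true := by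
        rw [PySem.Str.isIn_eq, PySem.Chars.isIn_iff_infix, hl]
        rw [show ("[" : String).toList = ['['] from rfl, List.singleton_infix_iff]
        simp
      rw [if_pos hisin]
      have hsplit : ∃ x y : String, PySem.Str.splitMax? t "[" 1
          = some [x, y] ∧ x.toList = h := by
        have hmap := PySem.Str.splitMax?_map t "[" 1
        have hc : PySem.Chars.splitMax? t.toList ("[" : String).toList 1 = some [h, r] := by
          rw [hl, show ("[" : String).toList = ['['] from rfl, PySem.Chars.splitMax?]
          rw [if_neg (by norm_num), splitOnMax_bracket h r hh]
        rw [hc] at hmap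
        rcases ho : PySem.Str.splitMax? t "[" 1 with _ | ls
        · rw [ho] at hmap; simp at hmap
        · rw [ho] at hmap
          simp only [Option.map_some, Option.some.injEq] at hmap
          rcases ls with _ | ⟨x, _ | ⟨y, _ | _⟩⟩ <;> simp_all
      rcases hsplit with ⟨x, y, hxy, hx⟩
      rw [hxy]
      simp only [Option.getD_some, List.headD_cons]
      rw [PySem.Str.strIsalpha_eq, PySem.Str.startswith_eq, PySem.Str.startswith_eq, hx]
  · -- no '[': both sides reduce to membership of the whole string among the names
    have htw : t.toList.takeWhile (fun c => c != '[') = t.toList :=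
      List.takeWhile_eq_self_iff.mpr (by
        intro c hcmem
        simp only [bne_iff_ne, ne_eq]
        intro he
        exact hbr (he ▸ hcmem))
    rw [htw]
    have hnlen : ¬(t.toList.length < t.toList.length) := by omega
    rw [if_neg hnlen]
    have hisinf : ¬(PySem.Str.isIn "[" t = true) := by
      rw [PySem.Str.isIn_eq, PySem.Chars.isIn_iff_infix]
      rw [show ("[" : String).toList = ['['] from rfl, List.singleton_infix_iff]
      exact hbr
    rw [if_neg hisinf]
    have hf : ∀ g ∈ ParametricType,
        (t == g || PySem.Str.startswith t (g ++ "[")) = (t.toList == g.toList) := by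
      intro g hg
      rw [PySem.Str.startswith_eq, String.toList_append]
      rw [startswith_no_bracket _ _ hbr (by simp)]
      rw [str_beq_toList]
      simp
    rw [PySem.List.any_congr_mem hf]
    rw [List.contains_eq_any_beq]
    have hmapn : pvParamNames = ParametricType.map String.toList := by decide
    rw [hmapn, List.any_map]
    rw [show ((fun x => t.toList == x) ∘ String.toList) = (fun g => t.toList == g.toList) from rfl]
    by_cases hany : (ParametricType.any fun g => t.toList == g.toList) = true
    · rw [if_pos hany, hany]
    · rw [if_neg hany]
      rw [Bool.not_eq_true] at hany
      rw [hany]
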